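-- pv_equiv track=rewrite | github.com/Anh-01-10-0000/Jedd_lab | identify_mixed_charge_regions.py | score_polyamp
-- ===== SOURCE A (Python) =====
-- def score_polyamp(s, window, cutoff):
--     #s: amino acid seq, window: window size, cutoff: the minimum score to be considered as significant
--     #returns a string combining all the mixed charge regions
--     polyamph_regions = []
--     polyamph_start = 0
--     polyamph_end = 0
--     last_start = 0
--     last_end = 0
--     for j in range(window//2,1+len(s)-window//2):
--         region = ''
--         start = j-(window//2)
--         end = j+(window//2)
--         region = s[start:end]
--
--         pos = region.count('R')+region.count('K')
--         neg = region.count('E')+region.count('D')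
--         score = pos+neg
--
--         if score>=cutoff:
--             if polyamph_start == 0:
--                 extended_reg = s[polyamph_start:end]
--                 if extended_reg.count('R')+extended_reg.count('K')+extended_reg.count('E')+extended_reg.count('D')>=cutoff:
--                     polyamph_start = start
--                     polyamph_end = end
--                     last_start = polyamph_start
--                     last_end = polyamph_end
--             elif polyamph_end+1 > start: #if next start is within 10 from last end, join the 2
--                 if extended_reg.count('R')+extended_reg.count('K')+extended_reg.count('E')+extended_reg.count('D')>=cutoff:
--                     polyamph_end = end
--                     last_start = polyamph_start
--                     last_end = polyamph_end
--             else: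
--                 if extended_reg.count('R')+extended_reg.count('K')+extended_reg.count('E')+extended_reg.count('D')>=cutoff:
--                     polyamph_regions.append(s[polyamph_start:polyamph_end+1])
--                     polyamph_start = 0
--                     polyamph_end = 0
--     if last_end!=0:
--         temp1 = s[last_start:last_end+1]
--         if temp1 not in polyamph_regions:
--             polyamph_regions.append(temp1)
--     return polyamph_regions
-- ===== SOURCE B (Python) =====
-- def score_polyamp(s, window, cutoff):
--     # Same results as the original for window >= 0, but each window is scored
--     # in O(1) via a prefix-sum table of charged residues (single O(n) pass).
--     w2 = window // 2
--     n = len(s)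
--     P = [0]
--     tot = 0
--     for ch in s:
--         tot += ch in 'RKED'
--         P.append(tot)
--     regions = []
--     ps = pe = ls = le = 0
--     for j in range(w2, 1 + n - w2):
--         start = j - w2
--         end = j + w2
--         if P[end] - P[start] >= cutoff:
--             if ps == 0:
--                 ps, pe = start, end
--                 ls, le = ps, pe
--             elif pe + 1 > start:
--                 pe = end
--                 ls, le = ps, pe
--             else:
--                 regions.append(s[ps:pe + 1])
--                 ps = pe = 0
--     if le != 0:
--         t = s[ls:le + 1]
--         if t not in regions:
--             regions.append(t)
--     return regions
-- ===== Notes on version B (the rewrite author's own statement) =====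
-- stated objective: faster
-- what changed: B builds a prefix-sum table of charged residues (R/K/E/D) in one pass and scores every window and extended region in O(1) from it, dropping A's per-window slice-and-count scans and A's always-true re-checks of the remembered extended region; Pre_ excludes negative window sizes, where A still returns via Python's negative-slice wraparound but B's prefix-table indexing raises IndexError.
-- outside the precondition, e.g. on score_polyamp('RK', -2, 1): A returns [], B raises IndexError; on score_polyamp('RKDE', -4, 0): A returns ['K', '', '', ''], B raises IndexError
import Mathlib
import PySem

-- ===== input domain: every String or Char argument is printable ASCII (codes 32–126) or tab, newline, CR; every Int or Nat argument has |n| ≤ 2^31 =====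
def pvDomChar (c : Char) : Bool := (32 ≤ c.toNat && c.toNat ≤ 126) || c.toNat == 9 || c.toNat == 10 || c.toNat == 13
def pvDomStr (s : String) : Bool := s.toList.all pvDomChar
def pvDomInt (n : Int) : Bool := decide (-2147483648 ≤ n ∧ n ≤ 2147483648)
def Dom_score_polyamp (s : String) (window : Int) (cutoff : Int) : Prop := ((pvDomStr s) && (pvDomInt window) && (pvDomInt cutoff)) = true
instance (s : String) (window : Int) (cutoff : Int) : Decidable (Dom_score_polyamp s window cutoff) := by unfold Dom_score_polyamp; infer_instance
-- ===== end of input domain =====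

-- B replaces A's per-window substring counting (and A's always-true re-checks of the
-- remembered extended region) with a prefix-sum table of charged residues built in one
-- pass, so each window is scored in O(1).

-- ===== PORT A =====

structure PvStA where
  regions : List String
  ps : Int
  pe : Int
  ls : Int
  le : Int
  ext : List Char
deriving Repr, DecidableEq

def pvStepA (cs : List Char) (cutoff : Int) (w2 : Int) (st : PvStA) (j : Int) : PvStA :=
  let start := j - w2
  let stop := j + w2
  let region := PySem.List.slice cs (some start) (some stop)
  let pos : Int := (PySem.Chars.count region ['R'] : Int) + (PySem.Chars.count region ['K'] : Int)
  let neg : Int := (PySem.Chars.count region ['E'] : Int) + (PySem.Chars.count region ['D'] : Int)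
  let score := pos + neg
  if score ≥ cutoff then
    if st.ps = 0 then
      let ext := PySem.List.slice cs (some st.ps) (some stop)
      if (PySem.Chars.count ext ['R'] : Int) + (PySem.Chars.count ext ['K'] : Int)
          + (PySem.Chars.count ext ['E'] : Int) + (PySem.Chars.count ext ['D'] : Int) ≥ cutoff then
        { st with ps := start, pe := stop, ls := start, le := stop, ext := ext }
      else { st with ext := ext }
    else if st.pe + 1 > start then
      if (PySem.Chars.count st.ext ['R'] : Int) + (PySem.Chars.count st.ext ['K'] : Int)
          + (PySem.Chars.count st.ext ['E'] : Int) + (PySem.Chars.count st.ext ['D'] : Int) ≥ cutoff then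
        { st with pe := stop, ls := st.ps, le := stop }
      else st
    else
      if (PySem.Chars.count st.ext ['R'] : Int) + (PySem.Chars.count st.ext ['K'] : Int)
          + (PySem.Chars.count st.ext ['E'] : Int) + (PySem.Chars.count st.ext ['D'] : Int) ≥ cutoff then
        { st with regions := st.regions ++ [String.ofList (PySem.List.slice cs (some st.ps) (some (st.pe + 1)))],
                  ps := 0, pe := 0 }
      else st
  else st

def score_polyamp (s : String) (window : Int) (cutoff : Int) : List String :=
  let cs := s.toList
  let w2 := PySem.Int.floordiv window 2
  let fin := (PySem.List.pyRange w2 (1 + (cs.length : Int) - w2) 1).foldl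
    (pvStepA cs cutoff w2) ⟨[], 0, 0, 0, 0, []⟩
  if fin.le ≠ 0 then
    let temp1 := String.ofList (PySem.List.slice cs (some fin.ls) (some (fin.le + 1)))
    if temp1 ∈ fin.regions then fin.regions else fin.regions ++ [temp1]
  else fin.regions

-- ===== PORT B =====

structure PvStB where
  regions : List String
  ps : Int
  pe : Int
  ls : Int
  le : Int
deriving Repr, DecidableEq

def pvStepB (cs : List Char) (P : List Int) (cutoff : Int) (w2 : Int) (st : PvStB) (j : Int) : PvStB :=
  let start := j - w2
  let stop := j + w2
  if PySem.List.pyGetD P stop 0 - PySem.List.pyGetD P start 0 ≥ cutoff then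
    if st.ps = 0 then
      { st with ps := start, pe := stop, ls := start, le := stop }
    else if st.pe + 1 > start then
      { st with pe := stop, ls := st.ps, le := stop }
    else
      { st with regions := st.regions ++ [String.ofList (PySem.List.slice cs (some st.ps) (some (st.pe + 1)))],
                ps := 0, pe := 0 }
  else st

def score_polyamp_alt (s : String) (window : Int) (cutoff : Int) : List String :=
  let cs := s.toList
  let w2 := PySem.Int.floordiv window 2
  let Ptot := cs.foldl
    (fun (st : List Int × Int) ch =>
      let tot := st.2 + (if PySem.Chars.isIn [ch] ['R', 'K', 'E', 'D'] then 1 else 0)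
      (st.1 ++ [tot], tot))
    ([0], 0)
  let P := Ptot.1
  let fin := (PySem.List.pyRange w2 (1 + (cs.length : Int) - w2) 1).foldl
    (pvStepB cs P cutoff w2) ⟨[], 0, 0, 0, 0⟩
  if fin.le ≠ 0 then
    let temp1 := String.ofList (PySem.List.slice cs (some fin.ls) (some (fin.le + 1)))
    if temp1 ∈ fin.regions then fin.regions else fin.regions ++ [temp1]
  else fin.regions

-- ===== PRECONDITION & SPEC =====
-- Pre_ restricts to the function's natural domain of nonnegative window sizes: on
-- window < 0 A still returns (via Python's negative-slice wraparound) while B's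
-- prefix-sum table indexing raises IndexError, so those inputs are excluded.
def Pre_score_polyamp (s : String) (window : Int) (cutoff : Int) : Prop := 0 ≤ window
instance (s : String) (window : Int) (cutoff : Int) : Decidable (Pre_score_polyamp s window cutoff) := by unfold Pre_score_polyamp; infer_instance

def pvWitness_score_polyamp : String × Int × Int := ("RKDEAAAAARKDE", 4, 3)

def Spec_score_polyamp (s : String) (window : Int) (cutoff : Int) (out : List String) : Prop := out = score_polyamp_alt s window cutoff
instance (s : String) (window : Int) (cutoff : Int) (out : List String) : Decidable (Spec_score_polyamp s window cutoff out) := by unfold Spec_score_polyamp; infer_instance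

-- ===== CLAIM (what is proved, stated in full; the proofs are below) =====
def Claim_equal_score_polyamp : Prop := ∀ (s : String) (window : Int) (cutoff : Int), Dom_score_polyamp s window cutoff → Pre_score_polyamp s window cutoff → Spec_score_polyamp s window cutoff (score_polyamp s window cutoff)

-- ===== LEMMAS AND PROOFS =====

-- total charged-residue count of a character list (the quantity both programs score by)
def pvCC (l : List Char) : Int :=
  (l.count 'R' : Int) + (l.count 'K' : Int) + (l.count 'E' : Int) + (l.count 'D' : Int)

theorem pvCC_nonneg (l : List Char) : 0 ≤ pvCC l := by
  unfold pvCC; positivity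

theorem pvCC_append (a b : List Char) : pvCC (a ++ b) = pvCC a + pvCC b := by
  simp [pvCC, List.count_append]; ring

-- str.count with a single-character needle is the character count
theorem pvCountGo_single (c : Char) (l : List Char) : ∀ (fuel acc : Nat), l.length ≤ fuel →
    PySem.Chars.count.go [c] fuel l acc = acc + l.count c := by
  induction l with
  | nil => intro fuel acc h; cases fuel <;> simp [PySem.Chars.count.go]
  | cons hd t ih =>
    intro fuel acc h
    cases fuel with
    | zero => simp at h
    | succ f =>
      simp only [PySem.Chars.count.go, List.isPrefixOf, List.count_cons]
      by_cases hc : c = hd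
      · subst hc
        simp [ih f (acc + 1) (by simpa using h)]
        omega
      · simp [hc, Ne.symm hc, ih f acc (by simpa using h)]

theorem pvCount_singleton (l : List Char) (c : Char) :
    PySem.Chars.count l [c] = l.count c := by
  have := pvCountGo_single c l l.length 0 le_rfl
  simpa [PySem.Chars.count] using this

theorem pvCC_single (ch : Char) :
    pvCC [ch] = if PySem.Chars.isIn [ch] ['R', 'K', 'E', 'D'] then 1 else 0 := by
  by_cases h : ch ∈ ['R', 'K', 'E', 'D']
  · have hin : PySem.Chars.isIn [ch] ['R', 'K', 'E', 'D'] = true :=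
      (PySem.Chars.isIn_iff_infix _ _).2 ((List.singleton_infix_iff _ _).2 h)
    fin_cases h <;> simp_all [pvCC]
  · have hin : PySem.Chars.isIn [ch] ['R', 'K', 'E', 'D'] = false :=
      (PySem.Chars.isIn_eq_false_iff _ _).2 (fun hc => h ((List.singleton_infix_iff _ _).1 hc))
    simp at h
    simp [pvCC, hin, h.1, h.2.1, h.2.2.1, h.2.2.2]

-- the four-way counts written out by the ports are pvCC (both associations)
theorem pvFour_eq (l : List Char) :
    (PySem.Chars.count l ['R'] : Int) + (PySem.Chars.count l ['K'] : Int)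
      + (PySem.Chars.count l ['E'] : Int) + (PySem.Chars.count l ['D'] : Int) = pvCC l := by
  simp [pvCount_singleton, pvCC]

theorem pvFour_eq' (l : List Char) :
    ((PySem.Chars.count l ['R'] : Int) + (PySem.Chars.count l ['K'] : Int))
      + ((PySem.Chars.count l ['E'] : Int) + (PySem.Chars.count l ['D'] : Int)) = pvCC l := by
  rw [← pvFour_eq l]; ring

-- the prefix table B builds
theorem pvPrefix_spec (cs : List Char) :
    cs.foldl
      (fun (st : List Int × Int) ch =>
        let tot := st.2 + (if PySem.Chars.isIn [ch] ['R', 'K', 'E', 'D'] then 1 else 0)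
        (st.1 ++ [tot], tot))
      ([0], 0)
    = ((List.range (cs.length + 1)).map (fun k => pvCC (cs.take k)), pvCC cs) := by
  induction cs using List.reverseRecOn with
  | nil => simp [pvCC]
  | append_singleton xs x ih =>
    rw [List.foldl_append, ih]
    simp only [List.foldl_cons, List.foldl_nil]
    have hx : pvCC (xs ++ [x]) = pvCC xs + (if PySem.Chars.isIn [x] ['R', 'K', 'E', 'D'] then 1 else 0) := by
      rw [pvCC_append, pvCC_single]
    refine Prod.ext ?_ (by simp [hx])
    show _ ++ _ = _
    conv_rhs => rw [List.length_append, List.length_singleton, List.range_succ, List.map_append]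
    congr 1
    · refine (List.map_congr_left fun k hk => ?_).symm
      simp at hk
      rw [List.take_append_of_le_length (by omega)]
    · simp
      rw [List.take_of_length_le (by simp)]
      simp [hx]

theorem pvPrefix_lookup (cs : List Char) (k : Int) (h0 : 0 ≤ k) (hn : k ≤ (cs.length : Int)) :
    PySem.List.pyGetD ((List.range (cs.length + 1)).map (fun k => pvCC (cs.take k))) k 0
      = pvCC (cs.take k.toNat) := by
  rw [PySem.List.pyGetD_eq_getElem _ _ h0 (by simp; omega)]
  simp

theorem pvSlice_cc (cs : List Char) (a b : Int) (h0 : 0 ≤ a) (hab : a ≤ b) :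
    pvCC (PySem.List.slice cs (some a) (some b)) = pvCC (cs.take b.toNat) - pvCC (cs.take a.toNat) := by
  rw [PySem.List.slice_toNat cs h0 (le_trans h0 hab)]
  have h : b.toNat = a.toNat + (b.toNat - a.toNat) := by omega
  rw [show cs.take b.toNat = cs.take (a.toNat + (b.toNat - a.toNat)) by rw [← h], List.take_add, pvCC_append]
  ring

-- relation between the two loop states: equal visible fields, plus A's remembered
-- extended region always re-passes the cutoff check while a region is open
def pvRel (cutoff : Int) (a : PvStA) (b : PvStB) : Prop :=
  a.regions = b.regions ∧ a.ps = b.ps ∧ a.pe = b.pe ∧ a.ls = b.ls ∧ a.le = b.le ∧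
    (a.ps ≠ 0 → pvCC a.ext ≥ cutoff)

theorem pvStep_rel (cs : List Char) (cutoff w2 j : Int) (hw : 0 ≤ w2)
    (hj1 : w2 ≤ j) (hj2 : j < 1 + (cs.length : Int) - w2)
    (a : PvStA) (b : PvStB) (h : pvRel cutoff a b) :
    pvRel cutoff (pvStepA cs cutoff w2 a j)
      (pvStepB cs ((List.range (cs.length + 1)).map (fun k => pvCC (cs.take k))) cutoff w2 b j) := by
  obtain ⟨hr, hps, hpe, hls, hle, hext⟩ := h
  have h0s : (0:Int) ≤ j - w2 := by omega
  have hse : j - w2 ≤ j + w2 := by omega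
  have h0e : (0:Int) ≤ j + w2 := by omega
  have hen : j + w2 ≤ (cs.length : Int) := by omega
  have hsn : j - w2 ≤ (cs.length : Int) := by omega
  have hsc : pvCC (PySem.List.slice cs (some (j - w2)) (some (j + w2)))
      = pvCC (cs.take (j + w2).toNat) - pvCC (cs.take (j - w2).toNat) := pvSlice_cc cs _ _ h0s hse
  unfold pvStepA pvStepB
  simp only [pvFour_eq, pvFour_eq', pvPrefix_lookup cs _ h0e hen, pvPrefix_lookup cs _ h0s hsn, hsc, ← hps]
  by_cases hc : pvCC (cs.take (j + w2).toNat) - pvCC (cs.take (j - w2).toNat) ≥ cutoff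
  · rw [if_pos hc, if_pos hc]
    by_cases hz : a.ps = 0
    · have hext0 : pvCC (PySem.List.slice cs (some a.ps) (some (j + w2))) ≥ cutoff := by
        rw [hz, pvSlice_cc cs 0 (j + w2) le_rfl h0e]
        simp only [Int.toNat_zero, List.take_zero]
        have h1 := pvCC_nonneg (cs.take (j - w2).toNat)
        have h2 : pvCC ([] : List Char) = 0 := by simp [pvCC]
        omega
      rw [if_pos hz, if_pos hz, if_pos hext0]
      exact ⟨hr, rfl, rfl, rfl, rfl, fun _ => hext0⟩
    · have hcut : pvCC a.ext ≥ cutoff := hext hz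
      rw [if_neg hz, if_neg hz, ← hpe]
      by_cases hov : a.pe + 1 > j - w2
      · rw [if_pos hov, if_pos hcut, if_pos hov]
        exact ⟨hr, rfl, rfl, rfl, rfl, fun _ => hcut⟩
      · rw [if_neg hov, if_pos hcut, if_neg hov]
        exact ⟨by rw [hr], rfl, rfl, hls, hle, by simp⟩
  · rw [if_neg hc, if_neg hc]
    exact ⟨hr, hps, hpe, hls, hle, hext⟩

theorem pvFold_rel (cs : List Char) (cutoff w2 : Int) (hw : 0 ≤ w2)
    (L : List Int) (hL : ∀ j ∈ L, w2 ≤ j ∧ j < 1 + (cs.length : Int) - w2)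
    (a : PvStA) (b : PvStB) (h : pvRel cutoff a b) :
    pvRel cutoff (L.foldl (pvStepA cs cutoff w2) a)
      (L.foldl (pvStepB cs ((List.range (cs.length + 1)).map (fun k => pvCC (cs.take k))) cutoff w2) b) := by
  induction L generalizing a b with
  | nil => exact h
  | cons x t ih =>
    exact ih (fun j hj => hL j (List.mem_cons_of_mem _ hj)) _ _
      (pvStep_rel cs cutoff w2 x hw (hL x (List.mem_cons_self ..)).1 (hL x (List.mem_cons_self ..)).2 a b h)

-- ===== VERDICT (by name: the statement is the Claim_ definition above) =====
theorem score_polyamp_spec : Claim_equal_score_polyamp := by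
  intro s window cutoff _ hpre
  unfold Spec_score_polyamp score_polyamp score_polyamp_alt
  dsimp only
  rw [pvPrefix_spec s.toList]
  have hw : 0 ≤ PySem.Int.floordiv window 2 := by
    rw [PySem.Int.floordiv_eq_ediv_of_pos (by norm_num)]
    exact Int.ediv_nonneg hpre (by norm_num)
  have hrel := pvFold_rel s.toList cutoff (PySem.Int.floordiv window 2) hw
    (PySem.List.pyRange (PySem.Int.floordiv window 2) (1 + (s.toList.length : Int) - PySem.Int.floordiv window 2) 1)
    (fun j hj => PySem.List.mem_pyRange_one.1 hj)
    ⟨[], 0, 0, 0, 0, []⟩ ⟨[], 0, 0, 0, 0⟩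
    ⟨rfl, rfl, rfl, rfl, rfl, fun h => absurd rfl h⟩
  obtain ⟨hr, _, _, hls, hle, _⟩ := hrel
  simp only [hr, hls, hle]
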